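-- pv_equiv track=rewrite | github.com/Egglord-from-TPT/Eggr | eggr/eggr.py | eggr
-- ===== SOURCE A (Python) =====
-- def eggr(l,m):
-- 	a=sorted(l)[0]
-- 	b=[sorted(l)[0]]
-- 	c=0
-- 	while 1:
-- 		for i in range(len(l)):
-- 			c=a
-- 			for i in range(m):
-- 				if a+(m-(i)) in l:
-- 					a=a+(m-(i))
-- 					b.append(a)
-- 					break
-- 			if a+m>sorted(l)[len(l)-1]:
-- 				break
-- 			if c==a:
-- 				raise SyntaxError("No next index!")
-- 		if b==sorted(b):
-- 			break
-- 	return b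
-- ===== SOURCE B (Python) =====
-- def eggr(l, m):
--     # Sort once and walk a single pointer over the sorted list instead of
--     # re-sorting and scanning step sizes m..1 with membership tests each step.
--     sl = sorted(l)
--     a = sl[0]
--     hi = sl[-1]
--     b = [a]
--     i = 0
--     while True:
--         j = i
--         while j + 1 < len(sl) and sl[j + 1] <= a + m:
--             j += 1
--         stepped = sl[j] > a
--         if stepped:
--             a = sl[j]
--             b.append(a)
--             i = j
--         if a + m > hi:
--             return b
--         if not stepped:
--             raise SyntaxError("No next index!")
-- ===== Notes on version B (the rewrite author's own statement) =====
-- stated objective: faster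
-- what changed: B sorts the list once and walks a single monotone pointer over the sorted array to find each greedy step, instead of re-sorting the list inside the loop and scanning step sizes m..1 with a linear membership test for each candidate.
import Mathlib
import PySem

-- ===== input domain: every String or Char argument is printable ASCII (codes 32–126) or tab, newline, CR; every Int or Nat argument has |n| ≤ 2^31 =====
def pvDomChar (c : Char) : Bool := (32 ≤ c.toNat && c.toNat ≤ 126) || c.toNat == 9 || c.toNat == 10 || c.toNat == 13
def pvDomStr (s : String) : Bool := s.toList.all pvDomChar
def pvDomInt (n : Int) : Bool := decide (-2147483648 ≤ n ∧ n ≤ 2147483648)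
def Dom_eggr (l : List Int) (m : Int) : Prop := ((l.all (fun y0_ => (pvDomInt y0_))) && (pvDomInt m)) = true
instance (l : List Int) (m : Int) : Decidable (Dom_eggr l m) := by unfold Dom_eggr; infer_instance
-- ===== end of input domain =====

-- B replaces A's per-step scan of step sizes m..1 (membership-tested against the unsorted list,
-- with sorted(l) recomputed inside the loop) by one sort and a single monotone pointer walk.

-- ===== PORT A =====

-- result of one run of A's `for i in range(len(l))` loop:
-- brk = `break` reached (carries current a and b), raised = SyntaxError (carries b),
-- completed = the for loop ran out of iterations (back to the `while 1` check)
inductive EggrRes where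
  | brk : Int → List Int → EggrRes
  | raised : List Int → EggrRes
  | completed : Int → List Int → EggrRes
deriving DecidableEq, Repr

-- inner `for i in range(m): if a+(m-(i)) in l: ... break` — first hit wins
def eggrStep (l : List Int) (a m : Int) : Option Int :=
  (PySem.List.pyRange 0 m 1).findSome? (fun i => if a + (m - i) ∈ l then some (a + (m - i)) else none)

-- `for i in range(len(l))` of A, fuel = len(l); sorted(l)[len(l)-1] is recomputed each
-- iteration exactly as A does (pyGetD: the loop only runs with l ≠ [], where Python's
-- sorted(l)[len(l)-1] returns a value)
def eggrFor (l : List Int) (m : Int) : Nat → Int → List Int → EggrRes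
  | 0, a, b => .completed a b
  | fuel + 1, a, b =>
    let c := a
    let (a', b') := match eggrStep l a m with
      | some v => (v, b ++ [v])
      | none => (a, b)
    if a' + m > PySem.List.pyGetD (PySem.List.sorted l (fun x => x) false) ((l.length : Int) - 1) 0
    then .brk a' b'
    else if c = a' then .raised b'
    else eggrFor l m fuel a' b'

-- A's `while 1`: after the for loop, `if b==sorted(b): break`; SyntaxError returns b (sentinel,
-- outside Pre_); fuel sentinel likewise returns b
def eggrWhile (l : List Int) (m : Int) : Nat → Int → List Int → List Int
  | 0, _, b => b
  | f + 1, a, b =>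
    match eggrFor l m l.length a b with
    | .raised b' => b'
    | .brk a' b' =>
        if b' = PySem.List.sorted b' (fun x => x) false then b' else eggrWhile l m f a' b'
    | .completed a' b' =>
        if b' = PySem.List.sorted b' (fun x => x) false then b' else eggrWhile l m f a' b'

def eggr (l : List Int) (m : Int) : List Int :=
  match PySem.List.pyGet? (PySem.List.sorted l (fun x => x) false) 0 with
  | none => []   -- Python: IndexError on empty l (outside Pre_)
  | some a => eggrWhile l m (l.length + 1) a [a]

-- ===== PORT B =====

-- `while j+1 < len(sl) and sl[j+1] <= lim: j += 1`
def eggrAdv (sl : List Int) (lim : Int) (j : Nat) : Nat :=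
  if h : j + 1 < sl.length ∧ sl.getD (j + 1) 0 ≤ lim then eggrAdv sl lim (j + 1) else j
termination_by sl.length - j
decreasing_by omega

-- B's `while True` loop; fuel len(sl)+1 exceeds the iteration count (i strictly increases);
-- the `raise SyntaxError` returns b (sentinel, outside Pre_), as does the fuel sentinel
def eggrLoopB (sl : List Int) (m hi : Int) : Nat → Nat → Int → List Int → List Int
  | 0, _, _, b => b
  | f + 1, i, a, b =>
    let j := eggrAdv sl (a + m) i
    if sl.getD j 0 > a then
      let a' := sl.getD j 0
      let b' := b ++ [a']
      if a' + m > hi then b' else eggrLoopB sl m hi f j a' b'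
    else
      if a + m > hi then b else b   -- return b / raise SyntaxError (sentinel b)

def eggr_alt (l : List Int) (m : Int) : List Int :=
  let sl := PySem.List.sorted l (fun x => x) false
  match PySem.List.pyGet? sl 0 with
  | none => []   -- Python: IndexError on empty l (outside Pre_)
  | some a =>
    -- hi = sl[-1]; sl ≠ [] here, where Python's sl[-1] returns a value
    let hi := PySem.List.pyGetD sl (-1) 0
    eggrLoopB sl m hi (sl.length + 1) 0 a [a]

-- ===== PRECONDITION & SPEC =====
-- Pre_ excludes exactly the inputs where the Python A raises: the empty list (IndexError) and
-- lists containing an element x with x+m ≤ max(l) but no element in (x, x+m]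
-- (the greedy chain gets stuck there: SyntaxError "No next index!").
def Pre_eggr (l : List Int) (m : Int) : Prop :=
  l ≠ [] ∧ ∀ x ∈ l, (∃ y ∈ l, x + m ≤ y) → ∃ y ∈ l, x < y ∧ y ≤ x + m
instance (l : List Int) (m : Int) : Decidable (Pre_eggr l m) := by unfold Pre_eggr; infer_instance

def pvWitness_eggr : List Int × Int := ([0, 1, 2], 1)

def Spec_eggr (l : List Int) (m : Int) (out : List Int) : Prop := out = eggr_alt l m
instance (l : List Int) (m : Int) (out : List Int) : Decidable (Spec_eggr l m out) := by unfold Spec_eggr; infer_instance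

-- ===== CLAIM (what is proved, stated in full; the proofs are below) =====
def Claim_equal_eggr : Prop := ∀ (l : List Int) (m : Int), Dom_eggr l m → Pre_eggr l m → Spec_eggr l m (eggr l m)

-- ===== LEMMAS AND PROOFS =====

-- A's inner scan over step sizes m-i, i = 0..m-1: any hit lies in (a, a+m] and the first hit
-- is the largest member of l in that window (stated for a general start lo of the scan)
lemma eggrScan_spec (l : List Int) (a m : Int) : ∀ (lo : Int),
    (∀ v, (PySem.List.pyRange lo m 1).findSome?
        (fun i => if a + (m - i) ∈ l then some (a + (m - i)) else none) = some v →
      v ∈ l ∧ a < v ∧ v ≤ a + m - lo ∧ ∀ w ∈ l, a < w → w ≤ a + m - lo → w ≤ v)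
  ∧ ((PySem.List.pyRange lo m 1).findSome?
        (fun i => if a + (m - i) ∈ l then some (a + (m - i)) else none) = none →
      ∀ w ∈ l, a < w → w ≤ a + m - lo → False) := by
  intro lo
  induction hn : (m - lo).toNat generalizing lo with
  | zero =>
    have : PySem.List.pyRange lo m 1 = [] := by
      simp [PySem.List.pyRange]; omega
    rw [this]
    constructor
    · intro v hv; simp at hv
    · intro _ w hw haw hwm; omega
  | succ n ih =>
    have hlt : lo < m := by omega
    rw [PySem.List.pyRange_one_cons hlt]
    by_cases hmem : a + (m - lo) ∈ l
    · constructor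
      · intro v hv
        simp [hmem] at hv
        subst hv
        refine ⟨hmem, by omega, by omega, ?_⟩
        intro w _ _ h2; omega
      · intro h
        simp [hmem] at h
    · have ih' := ih (lo + 1) (by omega)
      constructor
      · intro v hv
        simp only [List.findSome?_cons, hmem, if_false] at hv
        obtain ⟨h1, h2, h3, h4⟩ := ih'.1 v hv
        refine ⟨h1, h2, by omega, ?_⟩
        intro w hw haw hwm
        by_cases he : w = a + (m - lo)
        · exact absurd (he ▸ hw) hmem
        · exact h4 w hw haw (by omega)
      · intro h
        simp only [List.findSome?_cons, hmem, if_false] at h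
        intro w hw haw hwm
        by_cases he : w = a + (m - lo)
        · exact absurd (he ▸ hw) hmem
        · exact ih'.2 h w hw haw (by omega)

lemma eggrStep_some (l : List Int) (a m v : Int) (h : eggrStep l a m = some v) :
    v ∈ l ∧ a < v ∧ v ≤ a + m ∧ ∀ w ∈ l, a < w → w ≤ a + m → w ≤ v := by
  have := (eggrScan_spec l a m 0).1 v h
  simpa using this

lemma eggrStep_none (l : List Int) (a m : Int) (h : eggrStep l a m = none) :
    ∀ w ∈ l, a < w → w ≤ a + m → False := by
  have := (eggrScan_spec l a m 0).2 h
  simpa using this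

-- B's pointer advance: it stays in range, only moves right onto values ≤ lim, and stops
-- exactly when the next value exceeds lim (or the array ends)
lemma eggrAdv_spec (sl : List Int) (lim : Int) : ∀ (i : Nat), i < sl.length →
    i ≤ eggrAdv sl lim i ∧ eggrAdv sl lim i < sl.length ∧
    (eggrAdv sl lim i = i ∨ sl.getD (eggrAdv sl lim i) 0 ≤ lim) ∧
    (eggrAdv sl lim i + 1 < sl.length → lim < sl.getD (eggrAdv sl lim i + 1) 0) := by
  intro i hi
  induction hn : sl.length - i generalizing i with
  | zero => omega
  | succ n ih =>
    rw [eggrAdv]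
    split
    · rename_i h
      have := ih (i + 1) h.1 (by omega)
      refine ⟨by omega, this.2.1, ?_, this.2.2.2⟩
      rcases this.2.2.1 with he | hle
      · rw [he]; exact Or.inr h.2
      · exact Or.inr hle
    · rename_i h
      refine ⟨le_refl i, hi, Or.inl rfl, ?_⟩
      intro h1
      push Not at h
      exact h h1

lemma getD_mono (sl : List Int) (hp : sl.Pairwise (· ≤ ·)) (p q : Nat) (hpq : p ≤ q)
    (hq : q < sl.length) : sl.getD p 0 ≤ sl.getD q 0 := by
  rw [List.getD_eq_getElem sl 0 (by omega), List.getD_eq_getElem sl 0 hq]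
  rcases eq_or_lt_of_le hpq with he | hl
  · subst he; exact le_refl _
  · exact List.pairwise_iff_getElem.mp hp p q (by omega) hq hl

-- one greedy step, both ways: on the sorted list B's pointer target is exactly the value A's
-- scan finds (the largest member of l in (a, a+m]), and the two "no step" conditions coincide
lemma eggr_step_bridge (l : List Int) (m : Int) (sl : List Int)
    (hsl : sl = PySem.List.sorted l (fun x => x) false)
    (i : Nat) (a : Int) (hi : i < sl.length) (ha : sl.getD i 0 = a) :
    (a < sl.getD (eggrAdv sl (a + m) i) 0 →
      i < eggrAdv sl (a + m) i ∧ eggrStep l a m = some (sl.getD (eggrAdv sl (a + m) i) 0)) ∧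
    (¬ a < sl.getD (eggrAdv sl (a + m) i) 0 → eggrStep l a m = none) := by
  have hp : sl.Pairwise (· ≤ ·) := by
    rw [hsl]; exact PySem.List.sorted_pairwise l (fun x => x)
  have hmem : ∀ x, x ∈ sl ↔ x ∈ l := by
    intro x; rw [hsl]; exact PySem.List.mem_sorted l (fun x => x) false x
  obtain ⟨hij, hjn, hjle, hjgt⟩ := eggrAdv_spec sl (a + m) i hi
  set j := eggrAdv sl (a + m) i with hj
  have hbeyond : ∀ w ∈ l, a < w → w ≤ a + m → w ≤ sl.getD j 0 := by
    intro w hw haw hwm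
    obtain ⟨k, hk, hkw⟩ := List.getElem_of_mem ((hmem w).mpr hw)
    by_cases hkj : k ≤ j
    · calc w = sl.getD k 0 := by rw [List.getD_eq_getElem sl 0 hk, hkw]
        _ ≤ sl.getD j 0 := getD_mono sl hp k j hkj hjn
    · exfalso
      have h1 : j + 1 < sl.length := by omega
      have h2 : a + m < sl.getD (j + 1) 0 := hjgt h1
      have h3 : sl.getD (j + 1) 0 ≤ sl.getD k 0 := getD_mono sl hp (j + 1) k (by omega) hk
      rw [List.getD_eq_getElem sl 0 hk, hkw] at h3
      omega
  constructor
  · intro hstep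
    have hne : j ≠ i := by intro h; rw [h, ha] at hstep; omega
    have hjlim : sl.getD j 0 ≤ a + m := by
      rcases hjle with h | h
      · exact absurd h hne
      · exact h
    have hvmem : sl.getD j 0 ∈ l := by
      rw [← hmem, List.getD_eq_getElem sl 0 hjn]
      exact List.getElem_mem hjn
    refine ⟨by omega, ?_⟩
    cases hE : eggrStep l a m with
    | none => exact (eggrStep_none l a m hE _ hvmem hstep hjlim).elim
    | some u =>
      obtain ⟨hu1, hu2, hu3, hu4⟩ := eggrStep_some l a m u hE
      have h5 : u ≤ sl.getD j 0 := hbeyond u hu1 hu2 hu3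
      have h6 : sl.getD j 0 ≤ u := hu4 _ hvmem hstep hjlim
      rw [le_antisymm h5 h6]
  · intro hstep
    cases hE : eggrStep l a m with
    | none => rfl
    | some u =>
      exfalso
      obtain ⟨hu1, hu2, hu3, _⟩ := eggrStep_some l a m u hE
      have := hbeyond u hu1 hu2 hu3
      omega

lemma pyGet?_zero (xs : List Int) (a : Int) (h : PySem.List.pyGet? xs 0 = some a) :
    xs.getD 0 0 = a ∧ xs ≠ [] := by
  cases xs <;> simp [PySem.List.pyGet?, PySem.List.pyIdx?] at h ⊢ <;> omega

lemma pyGetD_last (xs : List Int) (h : xs ≠ []) :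
    PySem.List.pyGetD xs (-1) 0 = PySem.List.pyGetD xs ((xs.length : Int) - 1) 0 := by
  cases xs with
  | nil => simp at h
  | cons x t =>
    simp [PySem.List.pyGetD, PySem.List.pyGet?, PySem.List.pyIdx?]

-- the two loops run in lockstep: with a = sl[i] and b strictly increasing below a, A's for
-- loop exits by break or by raise and B's loop returns the same list (b is sorted at a break,
-- so A's `while 1` then stops)
lemma eggr_lockstep (l : List Int) (m : Int) (sl : List Int)
    (hsl : sl = PySem.List.sorted l (fun x => x) false)
    (hi : Int) (hhi : hi = PySem.List.pyGetD sl ((l.length : Int) - 1) 0) :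
    ∀ (fa : Nat), ∀ (fb i : Nat) (a : Int) (b : List Int),
      i < sl.length → sl.getD i 0 = a →
      sl.length - i ≤ fa → sl.length - i < fb →
      b.Pairwise (· < ·) → (∀ x ∈ b, x ≤ a) →
      (∃ a' b', eggrFor l m fa a b = .brk a' b' ∧ eggrLoopB sl m hi fb i a b = b'
          ∧ b' = PySem.List.sorted b' (fun x => x) false)
      ∨ (∃ b', eggrFor l m fa a b = .raised b' ∧ eggrLoopB sl m hi fb i a b = b') := by
  intro fa
  induction fa with
  | zero => intro fb i a b h1 _ h3 _ _ _; omega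
  | succ fa ih =>
    intro fb i a b hin ha hfa hfb hbp hble
    cases fb with
    | zero => omega
    | succ fb =>
    obtain ⟨hij, hjn, hjle, hjgt⟩ := eggrAdv_spec sl (a + m) i hin
    obtain ⟨hbr1, hbr2⟩ := eggr_step_bridge l m sl hsl i a hin ha
    rw [eggrFor, eggrLoopB]
    rw [← hsl, ← hhi]
    set j := eggrAdv sl (a + m) i with hj
    by_cases hstep : a < sl.getD j 0
    · obtain ⟨hij', hE⟩ := hbr1 hstep
      rw [hE]
      simp only [gt_iff_lt, hstep, if_true]
      set v := sl.getD j 0 with hv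
      have hpw : (b ++ [v]).Pairwise (· < ·) := by
        rw [List.pairwise_append]
        refine ⟨hbp, List.pairwise_singleton _ _, ?_⟩
        intro x hx y hy
        simp at hy; subst hy
        exact lt_of_le_of_lt (hble x hx) hstep
      by_cases hbrk : v + m > hi
      · rw [if_pos hbrk, if_pos hbrk]
        refine Or.inl ⟨v, b ++ [v], rfl, rfl, ?_⟩
        exact (PySem.List.sorted_eq_of_perm_of_pairwise_lt _ _ _ (List.Perm.refl _) hpw).symm
      · rw [if_neg hbrk, if_neg hbrk, if_neg (by omega : ¬ a = v)]
        exact ih fb j v (b ++ [v]) hjn rfl (by omega) (by omega) hpw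
          (by intro x hx; simp at hx
              rcases hx with hx | hx
              · exact le_of_lt (lt_of_le_of_lt (hble x hx) hstep)
              · omega)
    · have hE := hbr2 hstep
      rw [hE]
      simp only [gt_iff_lt, hstep, if_false]
      by_cases hbrk : a + m > hi
      · rw [if_pos hbrk, if_pos hbrk]
        refine Or.inl ⟨a, b, rfl, rfl, ?_⟩
        exact (PySem.List.sorted_eq_of_perm_of_pairwise_lt _ _ _ (List.Perm.refl _) hbp).symm
      · rw [if_neg hbrk, if_neg hbrk, if_pos trivial]
        exact Or.inr ⟨b, rfl, rfl⟩

-- ===== VERDICT (by name: the statement is the Claim_ definition above) =====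
theorem eggr_spec : Claim_equal_eggr := by
  unfold Claim_equal_eggr
  intro l m _ _
  unfold Spec_eggr eggr eggr_alt
  cases h0 : PySem.List.pyGet? (PySem.List.sorted l (fun x => x) false) 0 with
  | none => simp [h0]
  | some a =>
    simp only [h0]
    obtain ⟨ha0, hne⟩ := pyGet?_zero _ _ h0
    set sl := PySem.List.sorted l (fun x => x) false with hsl
    have hlen : sl.length = l.length := PySem.List.length_sorted l (fun x => x) false
    have hpos : 0 < sl.length := by
      cases hsl' : sl with
      | nil => exact absurd hsl' hne
      | cons x t => simp
    have hhi : PySem.List.pyGetD sl (-1) 0 = PySem.List.pyGetD sl ((l.length : Int) - 1) 0 := by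
      rw [pyGetD_last sl hne, hlen]
    have hls := eggr_lockstep l m sl hsl.symm.symm (PySem.List.pyGetD sl (-1) 0) hhi
      l.length (sl.length + 1) 0 a [a] hpos ha0 (by omega) (by omega)
      (List.pairwise_singleton _ _) (by simp)
    rw [eggrWhile]
    rcases hls with ⟨a', b', hFor, hLoop, hsort⟩ | ⟨b', hFor, hLoop⟩
    · rw [hFor]
      dsimp only
      rw [if_pos hsort]
      exact hLoop.symm
    · rw [hFor]
      dsimp only
      exact hLoop.symm
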